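-- pv_equiv track=rewrite | github.com/mozilla-services/socorro | webapp-django/crashstats/crashstats/tests/test_archivescraper.py | absolute_links_parents
-- ===== SOURCE A (Python) =====
-- def absolute_links_parents(path):
--     """Generate (path, link name) for all parents of a given path
--
--     :arg path: a url path
--
--     :returns: iterator over all the (parent path, child link) pairs
--
--     For example:
--
--     >>> list(absolute_links_parents('/pub/firefox/candidates/64.0b13-candidates/'))
--     [('/', 'pub/'), ('/pub/', 'firefox/'), ('/pub/firefox/', 'candidates/'),
--     ('/pub/firefox/candidates/', '64.0b13-candidates/')]
--
--     """
--     path_parts = path.strip("/").split("/")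
--     for i, path_part in enumerate(path_parts):
--         parent_path = "/" + "/".join(path_parts[0:i])
--         if parent_path != "/":
--             parent_path += "/"
--
--         if not path_part.endswith(".json"):
--             path_part += "/"
--
--         yield (parent_path, path_part)
-- ===== SOURCE B (Python) =====
-- def absolute_links_parents(path):
--     """Same pairs as A, built with a running prefix instead of re-joining a slice each step."""
--     prefix = "/"
--     for part in path.strip("/").split("/"):
--         yield (prefix, part if part.endswith(".json") else part + "/")
--         prefix += part + "/"
-- ===== Notes on version B (the rewrite author's own statement) =====
-- stated objective: alternative
-- what changed: B maintains one running prefix string that grows by each part plus a slash, instead of A's re-joining the slice path_parts[0:i] and re-testing the joined string at every iteration; one accumulating pass instead of repeated joins.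
import Mathlib
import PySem

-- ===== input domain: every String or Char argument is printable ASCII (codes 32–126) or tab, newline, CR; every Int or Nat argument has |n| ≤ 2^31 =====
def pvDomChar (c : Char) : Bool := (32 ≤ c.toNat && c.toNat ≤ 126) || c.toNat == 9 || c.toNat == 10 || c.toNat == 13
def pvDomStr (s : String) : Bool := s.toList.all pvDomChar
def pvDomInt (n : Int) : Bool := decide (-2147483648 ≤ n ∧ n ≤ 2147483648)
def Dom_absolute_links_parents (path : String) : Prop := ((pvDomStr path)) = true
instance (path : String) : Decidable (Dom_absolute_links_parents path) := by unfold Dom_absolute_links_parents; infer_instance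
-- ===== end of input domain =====

-- B replaces A's per-iteration re-join of path_parts[0:i] by one running prefix accumulated across the loop (one O(n) pass).
-- Both A and B are Python generators; the ports return the list of yielded pairs.

-- ===== PORT A =====
-- loop body of A, named (ip = (i, path_part) from enumerate)
def pvEntryA (path_parts : List (List Char)) (ip : Int × List Char) : String × String :=
  let parent_path := '/' :: PySem.Chars.join ['/'] (PySem.List.slice path_parts (some 0) (some ip.1))
  let parent_path := if parent_path ≠ ['/'] then parent_path ++ ['/'] else parent_path
  let path_part := if ¬ (PySem.Chars.endswith ip.2 ".json".toList) then ip.2 ++ ['/'] else ip.2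
  (String.ofList parent_path, String.ofList path_part)

def absolute_links_parents (path : String) : List (String × String) :=
  let path_parts := PySem.Chars.splitOn (PySem.Chars.stripChars path.toList ['/']) ['/']
  (PySem.List.enumerate path_parts).map (pvEntryA path_parts)

-- ===== PORT B =====
-- B's loop over the parts with the running prefix as accumulator
def pvAltGo : List (List Char) → List Char → List (String × String)
  | [], _ => []
  | p :: rest, prefx =>
      (String.ofList prefx,
        String.ofList (if PySem.Chars.endswith p ".json".toList then p else p ++ ['/']))
        :: pvAltGo rest (prefx ++ p ++ ['/'])

def absolute_links_parents_alt (path : String) : List (String × String) :=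
  pvAltGo (PySem.Chars.splitOn (PySem.Chars.stripChars path.toList ['/']) ['/']) ['/']

-- ===== PRECONDITION & SPEC =====
def Spec_absolute_links_parents (path : String) (out : List (String × String)) : Prop := out = absolute_links_parents_alt path
instance (path : String) (out : List (String × String)) : Decidable (Spec_absolute_links_parents path out) := by unfold Spec_absolute_links_parents; infer_instance

-- ===== CLAIM (what is proved, stated in full; the proofs are below) =====
def Claim_equal_absolute_links_parents : Prop := ∀ (path : String), Dom_absolute_links_parents path → Spec_absolute_links_parents path (absolute_links_parents path)

-- ===== LEMMAS AND PROOFS =====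

-- running-prefix contents: each consumed part followed by '/'
def pvCat (ps : List (List Char)) : List Char := (ps.map (fun p => p ++ ['/'])).flatten

lemma pvCat_append (l : List (List Char)) (p : List Char) :
    pvCat (l ++ [p]) = pvCat l ++ p ++ ['/'] := by
  simp [pvCat]

lemma pvJoinCat (a : List Char) (t : List (List Char)) :
    PySem.Chars.join ['/'] (a :: t) ++ ['/'] = pvCat (a :: t) := by
  induction t generalizing a with
  | nil => simp [PySem.Chars.join, List.intercalate, pvCat]
  | cons b t' ih =>
    have h1 : PySem.Chars.join ['/'] (a :: b :: t') = a ++ ['/'] ++ PySem.Chars.join ['/'] (b :: t') := by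
      simp [PySem.Chars.join, List.intercalate, List.intersperse]
    have h2 : pvCat (a :: b :: t') = a ++ ['/'] ++ pvCat (b :: t') := by
      simp [pvCat]
    rw [h1, h2, List.append_assoc, List.append_assoc, ih b, ← List.append_assoc]

lemma pvJoinHeadNe (h : List Char) (t : List (List Char)) (j : Nat) (hne : h ≠ []) :
    PySem.Chars.join ['/'] (List.take (j + 1) (h :: t)) ≠ [] := by
  rw [List.take_succ_cons]
  cases hTake : List.take j t with
  | nil => simpa [PySem.Chars.join, List.intercalate] using hne
  | cons b t' =>
    have : PySem.Chars.join ['/'] (h :: b :: t') = h ++ ['/'] ++ PySem.Chars.join ['/'] (b :: t') := by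
      simp [PySem.Chars.join, List.intercalate, List.intersperse]
    simp [this, hne]

-- splitOn.go: the accumulator is a reversed prefix of the result
lemma pvGoAcc (sep : List Char) (fuel : Nat) (l cur : List Char) (acc : List (List Char)) :
    PySem.Chars.splitOn.go sep fuel l cur acc = acc.reverse ++ PySem.Chars.splitOn.go sep fuel l cur [] := by
  induction fuel generalizing l cur acc with
  | zero => simp [PySem.Chars.splitOn.go]
  | succ f ih =>
    cases l with
    | nil => simp [PySem.Chars.splitOn.go]
    | cons c rest =>
      rw [PySem.Chars.splitOn.go, PySem.Chars.splitOn.go]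
      by_cases h : sep.isPrefixOf (c :: rest) = true
      · simp only [h, if_true]
        rw [ih _ _ (cur.reverse :: acc), ih _ _ [cur.reverse]]
        simp
      · simp only [h]
        exact ih _ _ acc

-- splitOn.go with empty accumulator: the first piece starts with cur.reverse
lemma pvGoHead (sep : List Char) (fuel : Nat) (l cur : List Char) :
    ∃ h t, PySem.Chars.splitOn.go sep fuel l cur [] = (cur.reverse ++ h) :: t := by
  induction fuel generalizing l cur with
  | zero => exact ⟨l, [], by simp [PySem.Chars.splitOn.go]⟩
  | succ f ih =>
    cases l with
    | nil => exact ⟨[], [], by simp [PySem.Chars.splitOn.go]⟩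
    | cons c rest =>
      rw [PySem.Chars.splitOn.go]
      by_cases h : sep.isPrefixOf (c :: rest) = true
      · simp only [h, if_true]
        rw [pvGoAcc]
        obtain ⟨h', t', hgo⟩ := ih (List.drop sep.length (c :: rest)) []
        exact ⟨[], h' :: t', by rw [hgo]; simp⟩
      · simp only [h]
        obtain ⟨h', t', hgo⟩ := ih rest (c :: cur)
        exact ⟨c :: h', t', by rw [hgo]; simp⟩

-- splitting a string that does not start with '/': the first piece is nonempty
lemma pvSplitHead (c : Char) (rest : List Char) (hc : c ≠ '/') :
    ∃ h t, PySem.Chars.splitOn (c :: rest) ['/'] = (c :: h) :: t := by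
  rw [PySem.Chars.splitOn]
  have hlen : (c :: rest).length + 1 = rest.length + 2 := by simp
  rw [hlen, PySem.Chars.splitOn.go]
  have hpre : List.isPrefixOf ['/'] (c :: rest) = false := by
    simp [List.isPrefixOf]
    exact fun h => absurd h.symm hc
  simp only [hpre, Bool.false_eq_true, if_false]
  obtain ⟨h', t', hgo⟩ := pvGoHead ['/'] (rest.length + 1) rest [c]
  exact ⟨h', t', by rw [hgo]; simp⟩

-- a '/'-stripped string does not start with '/'
lemma pvStripHead (cs : List Char) (c : Char)
    (h : (PySem.Chars.stripChars cs ['/']).head? = some c) : c ≠ '/' := by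
  rw [PySem.Chars.stripChars] at h
  set p := fun x => List.contains ['/'] x with hp
  set u := List.dropWhile p cs with hu
  have hsuf : List.dropWhile p u.reverse <:+ u.reverse := List.dropWhile_suffix p
  have hpre : (List.dropWhile p u.reverse).reverse <+: u := by
    simpa using List.reverse_prefix.mpr hsuf
  obtain ⟨t, ht⟩ := hpre
  have hu_head : u.head? = some c := by
    rw [← ht]
    cases hr : (List.dropWhile p u.reverse).reverse with
    | nil => rw [hr] at h; simp at h
    | cons a l =>
        rw [hr] at h
        simp at h
        simp [h]
  have hpc : p c = false := by
    rw [hu] at hu_head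
    revert hu_head
    generalize cs = l
    induction l with
    | nil => simp
    | cons a tl ihl =>
      by_cases hpa : p a = true
      · simpa [hpa] using ihl
      · simp [hpa]
        rintro rfl
        simpa using hpa
  simp [hp] at hpc
  exact hpc

-- A's parent_path at index j equals the running prefix '/' ++ pvCat (take j)
lemma pvParent (full : List (List Char))
    (H : ∀ j : Nat, 1 ≤ j → j < full.length → PySem.Chars.join ['/'] (full.take j) ≠ [])
    (j : Nat) (hjlen : j < full.length) :
    (if ('/' :: PySem.Chars.join ['/'] (full.take j)) ≠ ['/']
      then ('/' :: PySem.Chars.join ['/'] (full.take j)) ++ ['/']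
      else '/' :: PySem.Chars.join ['/'] (full.take j)) = '/' :: pvCat (full.take j) := by
  cases j with
  | zero => simp [PySem.Chars.join, List.intercalate, pvCat]
  | succ k =>
    have hne := H (k + 1) (by omega) hjlen
    cases full with
    | nil => simp at hjlen
    | cons a t =>
      rw [List.take_succ_cons] at hne ⊢
      have hcons : '/' :: PySem.Chars.join ['/'] (a :: List.take k t) ≠ ['/'] := by
        intro hco
        exact hne (by simpa using hco)
      rw [if_pos hcons]
      rw [List.cons_append, pvJoinCat]

-- main loop correspondence
lemma pvMain (full : List (List Char))
    (H : ∀ j : Nat, 1 ≤ j → j < full.length → PySem.Chars.join ['/'] (full.take j) ≠ []) :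
    ∀ (parts : List (List Char)) (j : Nat), parts = full.drop j →
      (PySem.List.enumerate parts ((j : Nat) : Int)).map (pvEntryA full) =
        pvAltGo parts ('/' :: pvCat (full.take j)) := by
  intro parts
  induction parts with
  | nil => intro j _; simp [PySem.List.enumerate, pvAltGo]
  | cons p rest ih =>
    intro j hj
    have hjlen : j < full.length := by
      by_contra hge
      have : full.drop j = [] := List.drop_eq_nil_of_le (le_of_not_gt (by omega))
      rw [this] at hj
      exact (List.cons_ne_nil p rest) hj
    have hget : full[j]? = some p := by
      rw [← List.head?_drop, ← hj]
      rfl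
    have htake : full.take (j + 1) = full.take j ++ [p] := by
      rw [List.take_add_one, hget]
      rfl
    have hdrop : full.drop (j + 1) = rest := by
      have : full.drop (j + 1) = List.drop 1 (full.drop j) := by
        rw [List.drop_drop]
      rw [this, ← hj]
      rfl
    rw [PySem.List.enumerate_cons, List.map_cons, pvAltGo]
    have hslice : PySem.List.slice full (some 0) (some ((j : Nat) : Int)) = full.take j := by
      have h0 := PySem.List.slice_natCast full 0 j
      rw [show ((0 : Nat) : Int) = (0 : Int) from rfl] at h0
      rw [h0]
      simp
    have hhead : pvEntryA full (((j : Nat) : Int), p) =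
        (String.ofList ('/' :: pvCat (full.take j)),
         String.ofList (if PySem.Chars.endswith p ".json".toList then p else p ++ ['/'])) := by
      simp only [pvEntryA, hslice]
      rw [pvParent full H j hjlen]
      rw [ite_not]
    rw [hhead]
    have htail : (PySem.List.enumerate rest (((j : Nat) : Int) + 1)).map (pvEntryA full) =
        pvAltGo rest ('/' :: pvCat (full.take (j + 1))) := by
      have := ih (j + 1) hdrop.symm
      rw [← this]
      norm_num
    rw [htail, htake, List.cons_append, pvCat_append]
    simp

-- ===== VERDICT (by name: the statement is the Claim_ definition above) =====
theorem absolute_links_parents_spec : Claim_equal_absolute_links_parents := by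
  unfold Claim_equal_absolute_links_parents
  intro path _
  unfold Spec_absolute_links_parents absolute_links_parents absolute_links_parents_alt
  cases hs : PySem.Chars.stripChars path.toList ['/'] with
  | nil => decide
  | cons c rest =>
    have hc : c ≠ '/' := pvStripHead path.toList c (by rw [hs]; rfl)
    obtain ⟨h, t, hsplit⟩ := pvSplitHead c rest hc
    have H : ∀ j : Nat, 1 ≤ j → j < ((c :: h) :: t).length →
        PySem.Chars.join ['/'] (((c :: h) :: t).take j) ≠ [] := by
      intro j hj _
      obtain ⟨k, rfl⟩ : ∃ k, j = k + 1 := ⟨j - 1, by omega⟩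
      exact pvJoinHeadNe (c :: h) t k (by simp)
    have hm := pvMain ((c :: h) :: t) H ((c :: h) :: t) 0 rfl
    simpa [hsplit, pvCat] using hm
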